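-- pv_equiv track=rewrite | github.com/Creeper0809/PCFGCracking | lib/training/detectors/word_dectection.py | _merge_unlabeled
-- ===== SOURCE A (Python) =====
-- from typing import List, Tuple, Optional
--
-- Seg = Tuple[str, Optional[str]]  # 세그먼트 타입: (텍스트, 레이블)
--
-- def _merge_unlabeled(final: List[Seg]) -> List[Seg]:
--     """
--     연속된 라벨 None 세그먼트를 병합하여 단일 세그먼트로 합침.
--     """
--     merged: List[Seg] = []
--     for s, lab in final:
--         if lab is None and merged and merged[-1][1] is None:
--             merged[-1] = (merged[-1][0] + s, None)
--         else:
--             merged.append((s, lab))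
--     return merged
-- ===== SOURCE B (Python) =====
-- from itertools import groupby
-- from typing import List, Tuple, Optional
--
-- Seg = Tuple[str, Optional[str]]
--
-- def _merge_unlabeled(final: List[Seg]) -> List[Seg]:
--     out: List[Seg] = []
--     for is_none, run in groupby(final, key=lambda sl: sl[1] is None):
--         if is_none:
--             out.append((''.join(s for s, _ in run), None))
--         else:
--             out.extend(run)
--     return out
-- ===== Notes on version B (the rewrite author's own statement) =====
-- stated objective: idiomatic
-- what changed: Replaces the last-element mutation loop with itertools.groupby over maximal runs keyed by 'label is None', joining each None-run in one step.
import Mathlib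
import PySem

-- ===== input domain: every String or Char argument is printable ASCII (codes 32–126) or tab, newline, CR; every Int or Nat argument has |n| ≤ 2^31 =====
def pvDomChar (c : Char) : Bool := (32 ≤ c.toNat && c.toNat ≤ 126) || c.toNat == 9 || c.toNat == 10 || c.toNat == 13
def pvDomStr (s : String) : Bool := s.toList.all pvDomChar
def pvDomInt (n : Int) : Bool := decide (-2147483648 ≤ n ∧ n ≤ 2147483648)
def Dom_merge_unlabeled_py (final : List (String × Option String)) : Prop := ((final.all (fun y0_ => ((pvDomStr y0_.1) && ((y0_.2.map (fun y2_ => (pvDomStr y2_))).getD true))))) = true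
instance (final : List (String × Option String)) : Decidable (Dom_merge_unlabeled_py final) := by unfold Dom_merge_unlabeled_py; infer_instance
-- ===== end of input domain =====

-- ===== PORT A =====
def merge_unlabeled_py (final : List (String × Option String)) : List (String × Option String) :=
  final.foldl (fun merged x =>
    match x.2, merged.getLast? with
    | none, some (t, none) => merged.dropLast ++ [(t ++ x.1, none)]
    | _, _ => merged ++ [x]) []

-- ===== PORT B =====
-- B replaces A's last-element-rewriting loop with itertools.groupby over maximal runs (idiomatic; same O(n) cost).
mutual
-- run of consecutive None-labeled segments: join their texts into one segment
def mergeNoneRun (t : String) : List (String × Option String) → List (String × Option String)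
  | [] => [(t, none)]
  | (s, lab) :: rest =>
    match lab with
    | none => mergeNoneRun (t ++ s) rest
    | some l => (t, none) :: (s, some l) :: mergeGroups rest
-- split `final` into maximal runs keyed by "label is None"; emit each None-run joined, others unchanged
def mergeGroups : List (String × Option String) → List (String × Option String)
  | [] => []
  | (s, lab) :: rest =>
    match lab with
    | none => mergeNoneRun s rest
    | some l => (s, some l) :: mergeGroups rest
end

def merge_unlabeled_py_alt (final : List (String × Option String)) : List (String × Option String) :=
  mergeGroups final

-- ===== PRECONDITION & SPEC =====
def Spec_merge_unlabeled_py (final : List (String × Option String)) (out : List (String × Option String)) : Prop := out = merge_unlabeled_py_alt final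
instance (final : List (String × Option String)) (out : List (String × Option String)) : Decidable (Spec_merge_unlabeled_py final out) := by unfold Spec_merge_unlabeled_py; infer_instance

-- ===== CLAIM (what is proved, stated in full; the proofs are below) =====
def Claim_equal_merge_unlabeled_py : Prop := ∀ (final : List (String × Option String)), Dom_merge_unlabeled_py final → Spec_merge_unlabeled_py final (merge_unlabeled_py final)

-- ===== LEMMAS AND PROOFS =====

-- invariant: starting from an accumulator whose last label is not None (or empty),
-- A's fold appends exactly B's grouped output; the second conjunct handles an open None-run.
theorem foldA_inv (xs : List (String × Option String)) :
    (∀ acc : List (String × Option String),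
      acc.getLast?.map Prod.snd ≠ some none →
      xs.foldl (fun merged x =>
        match x.2, merged.getLast? with
        | none, some (t, none) => merged.dropLast ++ [(t ++ x.1, none)]
        | _, _ => merged ++ [x]) acc = acc ++ mergeGroups xs) ∧
    (∀ (acc : List (String × Option String)) (t : String),
      xs.foldl (fun merged x =>
        match x.2, merged.getLast? with
        | none, some (t, none) => merged.dropLast ++ [(t ++ x.1, none)]
        | _, _ => merged ++ [x]) (acc ++ [(t, none)]) = acc ++ mergeNoneRun t xs) := by
  induction xs with
  | nil => refine ⟨fun acc _ => by simp [mergeGroups], fun acc t => by simp [mergeNoneRun]⟩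
  | cons x rest ih =>
    obtain ⟨s, lab⟩ := x
    refine ⟨fun acc hacc => ?_, fun acc t => ?_⟩
    · cases lab with
      | none =>
        have hstep : (match (none : Option String), acc.getLast? with
            | none, some (t, none) => acc.dropLast ++ [(t ++ s, none)]
            | _, _ => acc ++ [(s, none)]) = acc ++ [(s, none)] := by
          rcases h : acc.getLast? with _ | ⟨u, _ | l⟩ <;> simp_all
        simp only [List.foldl_cons, hstep, ih.2, mergeGroups]
      | some l =>
        have hstep : (match (some l : Option String), acc.getLast? with
            | none, some (t, none) => acc.dropLast ++ [(t ++ s, none)]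
            | _, _ => acc ++ [(s, some l)]) = acc ++ [(s, some l)] := by
          rcases acc.getLast? with _ | ⟨u, v⟩ <;> rfl
        have hlast : (acc ++ [(s, some l)]).getLast?.map Prod.snd ≠ some none := by
          simp
        simp only [List.foldl_cons, hstep, ih.1 _ hlast, mergeGroups, List.append_assoc,
          List.cons_append, List.nil_append]
    · cases lab with
      | none =>
        have hstep : (match (none : Option String), (acc ++ [(t, none)]).getLast? with
            | none, some (u, none) => (acc ++ [(t, none)]).dropLast ++ [(u ++ s, none)]
            | _, _ => (acc ++ [(t, none)]) ++ [(s, none)]) = acc ++ [(t ++ s, none)] := by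
          simp
        simp only [List.foldl_cons, hstep, ih.2, mergeNoneRun]
      | some l =>
        have hstep : (match (some l : Option String), (acc ++ [(t, none)]).getLast? with
            | none, some (u, none) => (acc ++ [(t, none)]).dropLast ++ [(u ++ s, none)]
            | _, _ => (acc ++ [(t, none)]) ++ [(s, some l)])
            = (acc ++ [(t, none), (s, some l)]) := by
          simp
        have hlast : (acc ++ [(t, none), (s, some l)]).getLast?.map Prod.snd ≠ some none := by
          simp
        simp only [List.foldl_cons, hstep, ih.1 _ hlast, mergeNoneRun, List.append_assoc,
          List.cons_append, List.nil_append]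

-- ===== VERDICT (by name: the statement is the Claim_ definition above) =====
theorem merge_unlabeled_py_spec : Claim_equal_merge_unlabeled_py := by
  intro final _
  unfold Spec_merge_unlabeled_py merge_unlabeled_py merge_unlabeled_py_alt
  have h := (foldA_inv final).1 [] (by simp)
  simpa using h
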